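-- pv_equiv track=rewrite | github.com/tubus1130/CodingTest | 프로그래머스/1/42840. 모의고사/모의고사.py | solution
-- ===== SOURCE A (Python) =====
-- def solution(answers):
--     answer = []
--     p1 = [1,2,3,4,5] * 2000
--     p2 = [2,1,2,3,2,4,2,5] * 2000
--     p3 = [3,3,1,1,2,2,4,4,5,5] * 2000
--     count1 = 0
--     count2 = 0
--     count3 = 0
--     for i in range(len(answers)):
--         if answers[i] == p1[i]:
--             count1 += 1
--         if answers[i] == p2[i]:
--             count2 += 1
--         if answers[i] == p3[i]:
--             count3 += 1
--
--     maxcnt = max(count1, count2, count3)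
--     if maxcnt == count1:
--         answer.append(1)
--     if maxcnt == count2:
--         answer.append(2)
--     if maxcnt == count3:
--         answer.append(3)
--     return answer
-- ===== SOURCE B (Python) =====
-- def solution(answers):
--     # lcm of the pattern periods (5, 8, 10) is 40: within each 40-block the three
--     # pattern values at a given offset are fixed, so one histogram over
--     # (position mod 40, value) pairs replaces all per-element pattern comparisons.
--     patterns = ([1, 2, 3, 4, 5] * 8,
--                 [2, 1, 2, 3, 2, 4, 2, 5] * 5,
--                 [3, 3, 1, 1, 2, 2, 4, 4, 5, 5] * 4)
--     hist = {}
--     for i, a in enumerate(answers):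
--         key = (i % 40, a)
--         hist[key] = hist.get(key, 0) + 1
--     counts = [sum(hist.get((r, p[r]), 0) for r in range(40)) for p in patterns]
--     m = max(counts)
--     return [k + 1 for k, c in enumerate(counts) if c == m]
-- ===== Notes on version B (the rewrite author's own statement) =====
-- stated objective: alternative
-- what changed: A compares every answer against three materialised 10000-element pattern lists in one combined loop; B builds a histogram over (index mod 40, value) pairs in one pass (40 = lcm of the pattern periods) and obtains each pattern's score as a sum of 40 table lookups, so no element is ever compared against a pattern.
import Mathlib
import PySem

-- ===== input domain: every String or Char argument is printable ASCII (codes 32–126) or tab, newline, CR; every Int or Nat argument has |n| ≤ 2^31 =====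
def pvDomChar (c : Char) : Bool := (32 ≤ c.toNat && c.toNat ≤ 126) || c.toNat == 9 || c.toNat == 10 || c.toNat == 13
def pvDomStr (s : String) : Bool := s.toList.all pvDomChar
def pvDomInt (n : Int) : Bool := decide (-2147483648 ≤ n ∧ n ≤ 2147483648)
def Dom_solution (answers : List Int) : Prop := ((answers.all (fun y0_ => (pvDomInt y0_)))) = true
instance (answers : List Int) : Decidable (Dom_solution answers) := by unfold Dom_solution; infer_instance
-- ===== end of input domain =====

-- B replaces A's combined element-by-pattern comparison loop by a one-pass histogram over
-- (index mod 40, value) pairs (40 = lcm of the pattern periods); each pattern's score is then a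
-- sum of 40 table lookups (alternative algorithm, no per-element pattern comparison).

-- ===== PORT A =====
def solution (answers : List Int) : List Int :=
  let p1 := PySem.List.pyRepeat [1,2,3,4,5] 2000
  let p2 := PySem.List.pyRepeat [2,1,2,3,2,4,2,5] 2000
  let p3 := PySem.List.pyRepeat [3,3,1,1,2,2,4,4,5,5] 2000
  -- the pyGetD indexing is exact under Pre_solution (every index is in range there)
  let c := (PySem.List.pyRange 0 (PySem.List.len answers) 1).foldl
    (fun (c : Int × Int × Int) i =>
      (if PySem.List.pyGetD answers i 0 = PySem.List.pyGetD p1 i 0 then c.1 + 1 else c.1,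
       if PySem.List.pyGetD answers i 0 = PySem.List.pyGetD p2 i 0 then c.2.1 + 1 else c.2.1,
       if PySem.List.pyGetD answers i 0 = PySem.List.pyGetD p3 i 0 then c.2.2 + 1 else c.2.2))
    ((0 : Int), (0 : Int), (0 : Int))
  let maxcnt := max c.1 (max c.2.1 c.2.2)
  let answer : List Int := []
  let answer := if maxcnt = c.1 then answer ++ [1] else answer
  let answer := if maxcnt = c.2.1 then answer ++ [2] else answer
  let answer := if maxcnt = c.2.2 then answer ++ [3] else answer
  answer

-- ===== PORT B =====
def solution_alt (answers : List Int) : List Int :=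
  let pats : List (List Int) :=
    [PySem.List.pyRepeat [1,2,3,4,5] 8,
     PySem.List.pyRepeat [2,1,2,3,2,4,2,5] 5,
     PySem.List.pyRepeat [3,3,1,1,2,2,4,4,5,5] 4]
  let hist := (PySem.List.enumerate answers 0).foldl
    (fun (d : PySem.Dict (Int × Int) Int) ia =>
      let key := (PySem.Int.mod ia.1 40, ia.2)
      d.insert key (d.getD key 0 + 1)) PySem.Dict.empty
  let counts := pats.map (fun p =>
    ((PySem.List.pyRange 0 40 1).map (fun r => hist.getD (r, PySem.List.pyGetD p r 0) 0)).sum)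
  let m := (PySem.List.max? counts (fun x => x)).getD 0
  ((PySem.List.enumerate counts 0).filter (fun kc => kc.2 = m)).map (fun kc => kc.1 + 1)

-- ===== PRECONDITION & SPEC =====
-- Pre_ excludes only the inputs on which A raises: A indexes fixed 10000-element pattern lists,
-- so on any answers longer than 10000 Python A raises IndexError.
def Pre_solution (answers : List Int) : Prop := answers.length ≤ 10000
instance (answers : List Int) : Decidable (Pre_solution answers) := by unfold Pre_solution; infer_instance
def pvWitness_solution : List Int := [1, 3, 2, 4, 2]
def Spec_solution (answers : List Int) (out : List Int) : Prop := out = solution_alt answers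
instance (answers : List Int) (out : List Int) : Decidable (Spec_solution answers out) := by unfold Spec_solution; infer_instance

-- ===== CLAIM (what is proved, stated in full; the proofs are below) =====
def Claim_equal_solution : Prop := ∀ (answers : List Int), Dom_solution answers → Pre_solution answers → Spec_solution answers (solution answers)

-- ===== LEMMAS AND PROOFS =====

lemma flat_rep_get? {α : Type} (p : List α) (n k : Nat) (h : k < n * p.length) :
    ((List.replicate n p).flatten)[k]? = p[k % p.length]? := by
  induction n generalizing k with
  | zero => simp at h
  | succ n ih =>
    have hs : (n + 1) * p.length = n * p.length + p.length := Nat.succ_mul n p.length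
    rw [List.replicate_succ, List.flatten_cons]
    by_cases hk : k < p.length
    · rw [List.getElem?_append_left hk, Nat.mod_eq_of_lt hk]
    · rw [List.getElem?_append_right (by omega), Nat.mod_eq_sub_mod (show p.length ≤ k by omega),
        ih (k - p.length) (by have := Nat.succ_mul n p.length; omega)]

lemma pyGetD_pyRepeat (p : List Int) (n : Int) (i : Int) (d : Int)
    (h0 : 0 ≤ i) (h1 : i < n * p.length) :
    PySem.List.pyGetD (PySem.List.pyRepeat p n) i d
      = PySem.List.pyGetD p (PySem.Int.mod i (PySem.List.len p)) d := by
  have hp : 0 < p.length := by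
    by_contra h0'
    have hz : p.length = 0 := by omega
    rw [hz] at h1
    simp at h1
    omega
  have hmod : PySem.Int.mod i (PySem.List.len p) = ((i.toNat % p.length : Nat) : Int) := by
    simp [PySem.Int.mod]
    rw [Int.fmod_eq_emod, if_pos (Or.inl (by positivity : (0:Int) ≤ (p.length : Int)))]
    rw [max_eq_left h0]
    omega
  have hle : (n : Int) * p.length ≤ ((n.toNat : Int)) * p.length :=
    mul_le_mul_of_nonneg_right (Int.self_le_toNat n) (by positivity)
  have h1' : i < ((n.toNat * p.length : Nat) : Int) := by
    push_cast
    exact lt_of_lt_of_le h1 hle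
  have hk : i.toNat < n.toNat * p.length := by omega
  have hlen : (PySem.List.pyRepeat p n).length = n.toNat * p.length := by
    simp [PySem.List.pyRepeat]
  rw [PySem.List.pyGetD_eq_getElem _ d h0 (by rw [hlen]; exact_mod_cast h1'),
      PySem.List.pyGetD_eq_getElem _ d (by rw [hmod]; positivity)
        (by rw [hmod]; exact_mod_cast Nat.mod_lt _ hp)]
  have h2 := flat_rep_get? p n.toNat i.toNat hk
  have hA : i.toNat < ((List.replicate n.toNat p).flatten).length := by
    simpa using hk
  have hB : i.toNat % p.length < p.length := Nat.mod_lt _ hp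
  rw [List.getElem?_eq_getElem hA, List.getElem?_eq_getElem hB] at h2
  simp only [hmod, Int.toNat_natCast]
  simpa [PySem.List.pyRepeat] using h2

lemma foldl_ite_add {α : Type} (P : α → Prop) [DecidablePred P] (l : List α) (a : Int) :
    l.foldl (fun c x => if P x then c + 1 else c) a
      = a + (l.map (fun x => if P x then (1:Int) else 0)).sum := by
  induction l generalizing a with
  | nil => simp
  | cons x t ih => simp only [List.foldl_cons, List.map_cons, List.sum_cons, ih]; split_ifs <;> ring

-- A-side: the combined loop's count for pattern p equals an indicator sum over enumerate
lemma count_eq (answers : List Int) (p : List Int) (_hp : 0 < p.length)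
    (hlen : (answers.length : Int) ≤ 2000 * p.length) :
    (PySem.List.pyRange 0 (PySem.List.len answers) 1).foldl
      (fun c i => if PySem.List.pyGetD answers i 0 = PySem.List.pyGetD (PySem.List.pyRepeat p 2000) i 0 then c + 1 else c) 0
    = ((PySem.List.enumerate answers 0).map
        (fun ia => if ia.2 = PySem.List.pyGetD p (PySem.Int.mod ia.1 (PySem.List.len p)) 0 then (1:Int) else 0)).sum := by
  rw [foldl_ite_add (P := fun i => PySem.List.pyGetD answers i 0 = PySem.List.pyGetD (PySem.List.pyRepeat p 2000) i 0)]
  rw [PySem.List.enumerate_eq_map_pyRange answers (0:Int), List.map_map, zero_add]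
  refine congrArg List.sum (List.map_congr_left ?_)
  intro i hi
  have hmem : 0 ≤ i ∧ i < PySem.List.len answers := by
    simpa using (PySem.List.mem_pyRange_one).mp hi
  have hlt : i < ((2000 : Nat) : Int) * p.length := by
    simp only [PySem.List.len_eq] at hmem
    push_cast
    omega
  simp only [Function.comp]
  rw [pyGetD_pyRepeat p 2000 i 0 hmem.1 hlt]

-- B-side: Σ_{r ∈ range n} [ (a,b) = (r, g r) ] collapses to one indicator when 0 ≤ a < n
lemma sum_ind (n : Nat) (a b : Int) (g : Int → Int) (h0 : 0 ≤ a) (h1 : a < (n : Int)) :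
    ((PySem.List.pyRange 0 (n : Int) 1).map
      (fun r => if (a, b) = (r, g r) then (1:Int) else 0)).sum
    = if b = g a then 1 else 0 := by
  induction n with
  | zero => exact absurd h1 (by omega)
  | succ n ih =>
    have hcast : ((n + 1 : Nat) : Int) = (n : Int) + 1 := by push_cast; ring
    rw [hcast, PySem.List.pyRange_one_succ_right (by positivity), List.map_append, List.sum_append]
    by_cases ha : a < (n : Int)
    · rw [ih ha]
      have hne : (a, b) ≠ ((n : Int), g n) := fun h => by
        have := congrArg Prod.fst h; simp only [] at this; omega
      simp only [List.map_cons, List.map_nil, List.sum_cons, List.sum_nil, if_neg hne, add_zero]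
    · have han : a = (n : Int) := by omega
      rw [← han]
      have hz : ((PySem.List.pyRange 0 a 1).map
          (fun r => if (a, b) = (r, g r) then (1:Int) else 0)).sum = 0 := by
        rw [List.sum_eq_zero]
        intro x hx
        simp only [List.mem_map] at hx
        obtain ⟨r, hr, hrx⟩ := hx
        have hrb : 0 ≤ r ∧ r < a := by simpa using (PySem.List.mem_pyRange_one).mp hr
        have hne : (a, b) ≠ (r, g r) := fun h => by
          have := congrArg Prod.fst h; simp only [] at this; omega
        rw [if_neg hne] at hrx; omega
      rw [hz]
      by_cases hb : b = g a <;> simp [hb, Prod.ext_iff]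

-- B-side: the 40 histogram lookups for residue function g equal an indicator sum over the keys
lemma sum_count_eq (n : Nat) (ks : List (Int × Int)) (g : Int → Int)
    (hb : ∀ x ∈ ks, 0 ≤ x.1 ∧ x.1 < (n : Int)) :
    ((PySem.List.pyRange 0 (n : Int) 1).map
      (fun r => ((ks.count (r, g r) : Nat) : Int))).sum
    = (ks.map (fun x => if x.2 = g x.1 then (1:Int) else 0)).sum := by
  induction ks with
  | nil => simp
  | cons x t ih =>
    have hx := hb x (by simp)
    have hcnt : ∀ r : Int, (((x :: t).count (r, g r) : Nat) : Int)
        = ((t.count (r, g r) : Nat) : Int) + (if (x.1, x.2) = (r, g r) then (1:Int) else 0) := by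
      intro r
      rw [List.count_cons]
      by_cases h : x = (r, g r)
      · simp [h]
      · have h' : (x.1, x.2) ≠ (r, g r) := by simpa using h
        simp [h]
    simp only [hcnt]
    rw [PySem.List.sum_map_add_int, ih (fun y hy => hb y (by simp [hy])),
        sum_ind n x.1 x.2 g hx.1 hx.2]
    simp [add_comm]

-- final assembly: both programs pick the 1-based positions of the maximal count
lemma assemble_eq (s1 s2 s3 : Int) :
    (let M := max s1 (max s2 s3);
     (if M = s3 then
        (if M = s2 then (if M = s1 then ([] : List Int) ++ [1] else []) ++ [2]
         else (if M = s1 then ([] : List Int) ++ [1] else [])) ++ [3]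
      else
        (if M = s2 then (if M = s1 then ([] : List Int) ++ [1] else []) ++ [2]
         else (if M = s1 then ([] : List Int) ++ [1] else []))))
    = (let m := (PySem.List.max? [s1, s2, s3] (fun x => x)).getD 0;
       ((PySem.List.enumerate [s1, s2, s3] 0).filter (fun kc => kc.2 = m)).map (fun kc => kc.1 + 1)) := by
  simp only [PySem.List.enumerate_cons, PySem.List.enumerate_nil, PySem.List.max?_id_cons,
    List.foldl_cons, List.foldl_nil, Option.getD_some, List.filter_cons, List.filter_nil,
    List.nil_append, max_assoc]
  simp only [decide_eq_true_eq]
  split_ifs <;> first | (simp; done) | (exfalso; omega)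

-- B-side: one pattern's histogram-lookup score equals the same indicator sum A's count reduces to
lemma countB_eq (answers p : List Int) (m : Int) (hp : 0 < p.length)
    (hm : m * p.length = 40) :
    ((PySem.List.pyRange 0 (40:Int) 1).map (fun r =>
      ((PySem.List.enumerate answers 0).foldl
        (fun (d : PySem.Dict (Int × Int) Int) ia =>
          d.insert (PySem.Int.mod ia.1 40, ia.2)
            (d.getD (PySem.Int.mod ia.1 40, ia.2) 0 + 1)) PySem.Dict.empty).getD
        (r, PySem.List.pyGetD (PySem.List.pyRepeat p m) r 0) 0)).sum
    = ((PySem.List.enumerate answers 0).map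
        (fun ia => if ia.2 = PySem.List.pyGetD p (PySem.Int.mod ia.1 (PySem.List.len p)) 0 then (1:Int) else 0)).sum := by
  have hget : ∀ v : Int × Int,
      ((PySem.List.enumerate answers 0).foldl
        (fun (d : PySem.Dict (Int × Int) Int) ia =>
          d.insert (PySem.Int.mod ia.1 40, ia.2)
            (d.getD (PySem.Int.mod ia.1 40, ia.2) 0 + 1)) PySem.Dict.empty).getD v 0
      = ((((PySem.List.enumerate answers 0).map
            (fun ia => (PySem.Int.mod ia.1 40, ia.2))).count v : Nat) : Int) := by
    intro v
    rw [← List.foldl_map (f := fun ia : Int × Int => (PySem.Int.mod ia.1 40, ia.2))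
        (g := fun (d : PySem.Dict (Int × Int) Int) x => d.insert x (d.getD x 0 + 1)),
      PySem.Dict.getD_foldl_insert_add_one, PySem.Dict.getD_empty, zero_add]
  simp only [hget]
  have h40 : (40 : Int) = ((40 : Nat) : Int) := by norm_num
  rw [h40, sum_count_eq 40 _ (fun r => PySem.List.pyGetD (PySem.List.pyRepeat p m) r 0)
      (by
        intro x hx
        simp only [List.mem_map] at hx
        obtain ⟨ia, _, hia⟩ := hx
        rw [← hia]
        exact ⟨PySem.Int.mod_nonneg _ (by norm_num), by
          have := PySem.Int.mod_lt ia.1 (b := 40) (by norm_num); simpa using this⟩),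
    List.map_map]
  simp only [Nat.cast_ofNat]
  refine congrArg List.sum (List.map_congr_left ?_)
  intro ia hia
  have hk : 0 ≤ ia.1 := by
    obtain ⟨k, hlt, hk⟩ := (PySem.List.mem_enumerate_iff answers 0 ia).mp hia
    rw [hk]; simp
  simp only [Function.comp]
  have hmod0 : 0 ≤ PySem.Int.mod ia.1 40 := PySem.Int.mod_nonneg _ (by norm_num)
  have hmodlt : PySem.Int.mod ia.1 40 < m * (p.length : Int) := by
    rw [hm]; exact PySem.Int.mod_lt _ (by norm_num)
  rw [pyGetD_pyRepeat p m _ 0 hmod0 (by exact_mod_cast hmodlt)]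
  have hdvd : ((p.length : Int)) ∣ (40 : Int) := ⟨m, by rw [← hm]; ring⟩
  have hmm : PySem.Int.mod (PySem.Int.mod ia.1 40) (PySem.List.len p) = PySem.Int.mod ia.1 (PySem.List.len p) := by
    have hppos : (0:Int) < (p.length : Int) := by exact_mod_cast hp
    rw [PySem.Int.mod_eq_emod_of_pos (by norm_num : (0:Int) < 40)]
    rw [PySem.List.len_eq, PySem.Int.mod_eq_emod_of_pos hppos, PySem.Int.mod_eq_emod_of_pos hppos]
    exact Int.emod_emod_of_dvd _ hdvd
  rw [hmm]

-- ===== VERDICT (by name: the statement is the Claim_ definition above) =====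
theorem solution_spec : Claim_equal_solution := by
  intro answers _hdom hpre
  unfold Spec_solution solution solution_alt
  simp only [List.map_cons, List.map_nil]
  rw [PySem.List.foldl_prod_mk
        (f := fun c1 i => if PySem.List.pyGetD answers i 0 = PySem.List.pyGetD (PySem.List.pyRepeat [1,2,3,4,5] 2000) i 0 then c1 + 1 else c1)
        (g := fun (c2 : Int × Int) i =>
          (if PySem.List.pyGetD answers i 0 = PySem.List.pyGetD (PySem.List.pyRepeat [2,1,2,3,2,4,2,5] 2000) i 0 then c2.1 + 1 else c2.1,
           if PySem.List.pyGetD answers i 0 = PySem.List.pyGetD (PySem.List.pyRepeat [3,3,1,1,2,2,4,4,5,5] 2000) i 0 then c2.2 + 1 else c2.2))]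
  rw [PySem.List.foldl_prod_mk
        (f := fun c1 i => if PySem.List.pyGetD answers i 0 = PySem.List.pyGetD (PySem.List.pyRepeat [2,1,2,3,2,4,2,5] 2000) i 0 then c1 + 1 else c1)
        (g := fun (c2 : Int) i => if PySem.List.pyGetD answers i 0 = PySem.List.pyGetD (PySem.List.pyRepeat [3,3,1,1,2,2,4,4,5,5] 2000) i 0 then c2 + 1 else c2)]
  rw [count_eq answers [1,2,3,4,5] (by simp) (by unfold Pre_solution at hpre; simp; omega),
      count_eq answers [2,1,2,3,2,4,2,5] (by simp) (by unfold Pre_solution at hpre; simp; omega),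
      count_eq answers [3,3,1,1,2,2,4,4,5,5] (by simp) (by unfold Pre_solution at hpre; simp; omega)]
  simp only [countB_eq answers [1,2,3,4,5] 8 (by simp) (by norm_num),
    countB_eq answers [2,1,2,3,2,4,2,5] 5 (by simp) (by norm_num),
    countB_eq answers [3,3,1,1,2,2,4,4,5,5] 4 (by simp) (by norm_num)]
  exact assemble_eq _ _ _
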